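-- pv_equiv track=rewrite | github.com/Sonvisage12/QMS-WITH-BROKER | mqtt_queue_manager7.4.py | build_blended_queue1
-- ===== SOURCE A (Python) =====
-- def build_blended_queue1(sharedQueue, queueB):
--     blended = []
--     i, j = 0, 0  # indices for sharedQueue and queueB
--
--     while i < len(sharedQueue) or j < len(queueB):
--         # Take up to 5 from sharedQueue
--         for _ in range(5):
--             if i < len(sharedQueue):
--                 blended.append(sharedQueue[i])
--                 i += 1
--         # Take up to 10 from queueB
--         for _ in range(10):
--             if j < len(queueB):
--                 blended.append(queueB[j])
--                 j += 1
--
--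
--     return blended
-- ===== SOURCE B (Python) =====
-- def build_blended_queue1(sharedQueue, queueB):
--     # Two-phase "chunk then merge": slice each queue into fixed-size blocks,
--     # then walk the two chunk lists in lockstep, A-chunk before B-chunk.
--     a_chunks = [sharedQueue[k:k + 5] for k in range(0, len(sharedQueue), 5)]
--     b_chunks = [queueB[k:k + 10] for k in range(0, len(queueB), 10)]
--     blended = []
--     for t in range(max(len(a_chunks), len(b_chunks))):
--         if t < len(a_chunks):
--             blended += a_chunks[t]
--         if t < len(b_chunks):
--             blended += b_chunks[t]
--     return blended
-- ===== Notes on version B (the rewrite author's own statement) =====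
-- stated objective: alternative
-- what changed: Replaces A's single index-cursor pass with guarded element-by-element appends by a two-phase structure: slice each queue into fixed-size chunks (5 and 10), then merge the two chunk lists head-to-head, A-chunk before B-chunk.
import Mathlib
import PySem

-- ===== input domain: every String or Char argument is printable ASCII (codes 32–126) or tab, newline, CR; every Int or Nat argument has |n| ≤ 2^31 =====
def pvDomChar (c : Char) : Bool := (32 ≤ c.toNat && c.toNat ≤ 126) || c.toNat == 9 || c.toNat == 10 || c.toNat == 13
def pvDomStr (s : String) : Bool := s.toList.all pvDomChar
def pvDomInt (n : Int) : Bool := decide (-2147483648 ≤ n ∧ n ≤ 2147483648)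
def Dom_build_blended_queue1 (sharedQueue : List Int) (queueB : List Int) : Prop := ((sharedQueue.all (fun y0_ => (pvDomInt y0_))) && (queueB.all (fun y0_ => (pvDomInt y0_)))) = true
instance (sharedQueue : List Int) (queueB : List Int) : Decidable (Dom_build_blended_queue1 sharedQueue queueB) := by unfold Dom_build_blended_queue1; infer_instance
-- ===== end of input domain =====

-- B restructures A's single index-cursor pass as "chunk then merge": slice each queue into
-- fixed blocks (5 / 10) first, then walk the two chunk lists in lockstep; same O(n) cost.


-- ===== PORT A =====
-- A's while-loop over cursors i, j: each round appends up to 5 remaining elements of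
-- sharedQueue (the guarded 5-step for-loop on the remainder = take 5) then up to 10 of
-- queueB, until both cursors are exhausted.  Ported with a fuel counter bounding the
-- number of rounds; the fuel is a totality guard only and is never exhausted.
def bbqGoA : Nat → List Int → List Int → List Int
  | 0, _, _ => []
  | f + 1, xs, ys =>
    if xs = [] ∧ ys = [] then []
    else xs.take 5 ++ ys.take 10 ++ bbqGoA f (xs.drop 5) (ys.drop 10)

def build_blended_queue1 (sharedQueue : List Int) (queueB : List Int) : List Int :=
  bbqGoA (sharedQueue.length + queueB.length + 1) sharedQueue queueB

-- ===== PORT B =====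
-- Source B's chunk comprehension: [xs[k:k+n] for k in range(0, len(xs), n)]
def bbqChunks (n : Nat) (xs : List Int) : List (List Int) :=
  (PySem.List.pyRange 0 xs.length n).map
    (fun k => PySem.List.slice xs (some k) (some (k + n)))

-- Source B's merge loop: for t in range(max(len a, len b)): guarded extend by a[t], then b[t]
def bbqMerge (as bs : List (List Int)) : List Int :=
  (PySem.List.pyRange 0 (max (as.length : Int) (bs.length : Int)) 1).foldl
    (fun acc t =>
      let acc1 := if t < (as.length : Int) then acc ++ PySem.List.pyGetD as t [] else acc
      if t < (bs.length : Int) then acc1 ++ PySem.List.pyGetD bs t [] else acc1)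
    []

def build_blended_queue1_alt (sharedQueue : List Int) (queueB : List Int) : List Int :=
  bbqMerge (bbqChunks 5 sharedQueue) (bbqChunks 10 queueB)

-- ===== PRECONDITION & SPEC =====
def Spec_build_blended_queue1 (sharedQueue : List Int) (queueB : List Int) (out : List Int) : Prop := out = build_blended_queue1_alt sharedQueue queueB
instance (sharedQueue : List Int) (queueB : List Int) (out : List Int) : Decidable (Spec_build_blended_queue1 sharedQueue queueB out) := by unfold Spec_build_blended_queue1; infer_instance

-- ===== CLAIM (what is proved, stated in full; the proofs are below) =====
def Claim_equal_build_blended_queue1 : Prop := ∀ (sharedQueue : List Int) (queueB : List Int), Dom_build_blended_queue1 sharedQueue queueB → Spec_build_blended_queue1 sharedQueue queueB (build_blended_queue1 sharedQueue queueB)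

-- ===== LEMMAS AND PROOFS =====

-- fuel-free reference version of A's round loop (proof helper only)
def goSpec (xs ys : List Int) : List Int :=
  if xs = [] ∧ ys = [] then []
  else xs.take 5 ++ ys.take 10 ++ goSpec (xs.drop 5) (ys.drop 10)
termination_by xs.length + ys.length
decreasing_by
  rename_i h
  rw [not_and_or] at h
  rcases h with h | h
  · have := List.length_pos_iff.mpr h
    simp only [List.length_drop]; omega
  · have := List.length_pos_iff.mpr h
    simp only [List.length_drop]; omega

-- head-recursive reference version of chunking (proof helper only)
def chunksSpec (n : Nat) (xs : List Int) : List (List Int) :=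
  if xs = [] ∨ n = 0 then [] else xs.take n :: chunksSpec n (xs.drop n)
termination_by xs.length
decreasing_by
  rename_i h
  rw [not_or] at h
  have h1 : 0 < xs.length := List.length_pos_iff.mpr h.1
  simp only [List.length_drop]
  omega

-- head-recursive reference version of the merge loop (proof helper only)
def mergeSpec : List (List Int) → List (List Int) → List Int
  | [], bs => bs.flatten
  | a :: as, [] => a ++ mergeSpec as []
  | a :: as, b :: bs => a ++ b ++ mergeSpec as bs

theorem chunksSpec_nil (n : Nat) : chunksSpec n [] = [] := by
  rw [chunksSpec]; simp

theorem chunksSpec_cons (n : Nat) (xs : List Int) (hx : xs ≠ []) (hn : n ≠ 0) :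
    chunksSpec n xs = xs.take n :: chunksSpec n (xs.drop n) := by
  rw [chunksSpec]; simp [hx, hn]

theorem bbqGoA_eq (f : Nat) : ∀ xs ys : List Int, xs.length + ys.length < f →
    bbqGoA f xs ys = goSpec xs ys := by
  induction f with
  | zero => intro xs ys h; omega
  | succ f ih =>
    intro xs ys h
    rw [bbqGoA, goSpec]
    by_cases hxy : xs = [] ∧ ys = []
    · simp [hxy]
    · rw [if_neg hxy, if_neg hxy]
      have : (xs.drop 5).length + (ys.drop 10).length < f := by
        rw [not_and_or] at hxy
        rcases hxy with h' | h' <;>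
          · have := List.length_pos_iff.mpr h'
            simp only [List.length_drop]; omega
      rw [ih _ _ this]

-- ---- chunking: the slice comprehension equals the head-recursive chunking ----

-- number of chunks the comprehension produces
def pvCnt (n L : Nat) : Nat :=
  if (0 : Int) < (L : Int) then (((L : Int) + n - 1) / n).toNat else 0

theorem pvCnt_succ (n L : Nat) (hn : 0 < n) (hL : 0 < L) :
    pvCnt n L = pvCnt n (L - n) + 1 := by
  unfold pvCnt
  rw [if_pos (by exact_mod_cast hL)]
  by_cases hLe : L ≤ n
  · have hsub : L - n = 0 := by omega
    rw [hsub]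
    simp only [Nat.cast_zero, lt_irrefl, if_false]
    have h1 : (L : Int) + n - 1 = (L - 1 : Int) + 1 * n := by ring
    rw [h1, Int.add_mul_ediv_right _ _ (by exact_mod_cast hn.ne' : (n : Int) ≠ 0)]
    have h2 : (L - 1 : Int) / n = 0 :=
      Int.ediv_eq_zero_of_lt (by omega) (by omega)
    rw [h2]
    decide
  · have hsub : 0 < L - n := by omega
    rw [if_pos (by exact_mod_cast hsub)]
    have hc : ((L - n : Nat) : Int) = (L : Int) - n := by omega
    have h1 : (L : Int) + n - 1 = (((L - n : Nat) : Int) + n - 1) + 1 * n := by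
      rw [hc]; ring
    rw [h1, Int.add_mul_ediv_right _ _ (by exact_mod_cast hn.ne' : (n : Int) ≠ 0)]
    have hnn : 0 ≤ (((L - n : Nat) : Int) + n - 1) / n :=
      Int.ediv_nonneg (by omega) (by omega)
    omega

theorem chunksSpec_eq_map (n : Nat) (hn : 0 < n) : ∀ xs : List Int,
    chunksSpec n xs = (List.range (pvCnt n xs.length)).map
      (fun k => (xs.drop (n * k)).take n) := by
  intro xs
  induction hL : xs.length using Nat.strong_induction_on generalizing xs with
  | _ L ih =>
    subst hL
    by_cases hx : xs = []
    · subst hx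
      rw [chunksSpec_nil]
      simp [pvCnt]
    · have hL : 0 < xs.length := List.length_pos_iff.mpr hx
      rw [chunksSpec_cons n xs hx hn.ne',
          ih (xs.drop n).length (by simp only [List.length_drop]; omega) (xs.drop n) rfl]
      rw [pvCnt_succ n xs.length hn hL, List.range_succ_eq_map, List.map_cons,
          List.map_map]
      simp only [List.length_drop, Nat.mul_zero, List.drop_zero]
      congr 1
      apply List.map_congr_left
      intro k _
      simp only [Function.comp_apply, Nat.succ_eq_add_one, List.drop_drop]
      congr 2
      ring

theorem bbqChunks_eq (n : Nat) (hn : 0 < n) (xs : List Int) :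
    bbqChunks n xs = chunksSpec n xs := by
  rw [bbqChunks, PySem.List.pyRange_of_pos _ _ (by exact_mod_cast hn), List.map_map,
      chunksSpec_eq_map n hn xs]
  by_cases hx : xs = []
  · subst hx; simp [pvCnt]
  · have hL : 0 < xs.length := List.length_pos_iff.mpr hx
    rw [if_pos (by exact_mod_cast hL)]
    unfold pvCnt
    rw [if_pos (by exact_mod_cast hL)]
    apply List.map_congr_left
    intro k _
    simp only [Function.comp_apply, zero_add]
    have h1 : (n : Int) * k = ((n * k : Nat) : Int) := by push_cast; ring
    rw [h1]
    exact PySem.List.slice_natCast_add ..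

-- ---- merging: the indexed range loop equals the head-recursive merge ----

-- the Nat-level step of Source B's merge loop body
def pvStep (as bs : List (List Int)) (acc : List Int) (t : Nat) : List Int :=
  let acc1 := if t < as.length then acc ++ as.getD t [] else acc
  if t < bs.length then acc1 ++ bs.getD t [] else acc1

theorem pvStep_succ (as bs : List (List Int)) (acc : List Int) (t : Nat) :
    pvStep as bs acc (t + 1) = pvStep as.tail bs.tail acc t := by
  cases as <;> cases bs <;> simp [pvStep]

theorem pvFold_eq : ∀ (N : Nat) (as bs : List (List Int)), as.length + bs.length ≤ N →
    ∀ acc, (List.range (max as.length bs.length)).foldl (pvStep as bs) acc =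
      acc ++ mergeSpec as bs := by
  intro N
  induction N with
  | zero =>
    intro as bs h acc
    have ha : as = [] := List.length_eq_zero_iff.mp (by omega)
    have hb : bs = [] := List.length_eq_zero_iff.mp (by omega)
    subst ha; subst hb
    simp [mergeSpec]
  | succ N ih =>
    intro as bs h acc
    by_cases hab : as = [] ∧ bs = []
    · obtain ⟨ha, hb⟩ := hab; subst ha; subst hb
      simp [mergeSpec]
    · have hmax : max as.length bs.length = max as.tail.length bs.tail.length + 1 := by
        rw [not_and_or] at hab
        cases as <;> cases bs <;> simp_all
      rw [hmax, List.range_succ_eq_map, List.foldl_cons, List.foldl_map]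
      have hfun : (fun (acc : List Int) (k : Nat) => pvStep as bs acc k.succ) =
          pvStep as.tail bs.tail := by
        funext acc k
        exact pvStep_succ as bs acc k
      rw [hfun, ih as.tail bs.tail (by cases as <;> cases bs <;> simp_all <;> omega)]
      -- discharge the three shapes
      rcases as with _ | ⟨a, as'⟩ <;> rcases bs with _ | ⟨b, bs'⟩
      · exact absurd ⟨rfl, rfl⟩ hab
      · simp [pvStep, mergeSpec]
      · simp [pvStep, mergeSpec]
      · simp [pvStep, mergeSpec]

theorem bbqMerge_eq (as bs : List (List Int)) : bbqMerge as bs = mergeSpec as bs := by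
  rw [bbqMerge, PySem.List.pyRange_one, List.foldl_map]
  have hcnt : ((max (as.length : Int) (bs.length : Int)) - 0).toNat
      = max as.length bs.length := by
    rw [sub_zero]
    omega
  rw [hcnt]
  have hfun : (fun (acc : List Int) (k : Nat) =>
      (fun acc (t : Int) =>
        let acc1 := if t < (as.length : Int) then acc ++ PySem.List.pyGetD as t [] else acc
        if t < (bs.length : Int) then acc1 ++ PySem.List.pyGetD bs t [] else acc1)
        acc ((0 : Int) + k)) = pvStep as bs := by
    funext acc k
    simp only [zero_add, PySem.List.pyGetD_natCast, Nat.cast_lt, pvStep]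
  rw [hfun, pvFold_eq (as.length + bs.length) as bs le_rfl []]
  simp

-- ---- rounds = chunk-then-merge ----

theorem goSpec_eq_merge : ∀ xs ys : List Int,
    goSpec xs ys = mergeSpec (chunksSpec 5 xs) (chunksSpec 10 ys) := by
  intro xs ys
  induction xs, ys using goSpec.induct with
  | case1 xs ys h =>
    obtain ⟨hx, hy⟩ := h
    subst hx; subst hy
    rw [goSpec, chunksSpec_nil, chunksSpec_nil]
    simp [mergeSpec]
  | case2 xs ys h ih =>
    rw [goSpec, if_neg h]
    by_cases hx : xs = []
    · have hy : ys ≠ [] := fun hy => h ⟨hx, hy⟩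
      subst hx
      rw [chunksSpec_nil, chunksSpec_cons 10 ys hy (by omega)]
      rw [ih]
      simp [mergeSpec, chunksSpec_nil]
    · by_cases hy : ys = []
      · subst hy
        rw [chunksSpec_cons 5 xs hx (by omega), chunksSpec_nil]
        rw [ih]
        simp [mergeSpec, chunksSpec_nil]
      · rw [chunksSpec_cons 5 xs hx (by omega), chunksSpec_cons 10 ys hy (by omega)]
        simp only [mergeSpec]
        rw [ih]

-- ===== VERDICT (by name: the statement is the Claim_ definition above) =====
theorem build_blended_queue1_spec : Claim_equal_build_blended_queue1 := by
  intro xs ys _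
  show build_blended_queue1 xs ys = build_blended_queue1_alt xs ys
  unfold build_blended_queue1 build_blended_queue1_alt
  rw [bbqGoA_eq _ _ _ (by omega),
      bbqChunks_eq 5 (by omega), bbqChunks_eq 10 (by omega),
      bbqMerge_eq, goSpec_eq_merge]
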